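-- pv_equiv track=rewrite | github.com/g-pengrend/graph_job_recommender | 4. Geolocating/geolocator(old).py | get_progressive_address_parts
-- ===== SOURCE A (Python) =====
-- def get_progressive_address_parts(address):
--     # Split by comma and clean each part
--     parts = [p.strip() for p in address.split(',')]
--     addresses = []
--
--     # Build progressively larger address strings
--     current = parts[0]
--     addresses.append(current)
--
--     for part in parts[1:]:
--         current = f"{current} {part}"  # Remove comma, just use space
--         addresses.append(current)
--
--     return addresses
-- ===== SOURCE B (Python) =====
-- def get_progressive_address_parts(address):
--     parts = [p.strip() for p in address.split(',')]
--     return [" ".join(parts[:i + 1]) for i in range(len(parts))]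
-- ===== Notes on version B (the rewrite author's own statement) =====
-- stated objective: simpler
-- what changed: Replaces the running-accumulator loop that extends a `current` string and appends it step by step with a single comprehension that rebuilds each prefix independently by slicing the cleaned parts list and space-joining it.
import Mathlib
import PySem

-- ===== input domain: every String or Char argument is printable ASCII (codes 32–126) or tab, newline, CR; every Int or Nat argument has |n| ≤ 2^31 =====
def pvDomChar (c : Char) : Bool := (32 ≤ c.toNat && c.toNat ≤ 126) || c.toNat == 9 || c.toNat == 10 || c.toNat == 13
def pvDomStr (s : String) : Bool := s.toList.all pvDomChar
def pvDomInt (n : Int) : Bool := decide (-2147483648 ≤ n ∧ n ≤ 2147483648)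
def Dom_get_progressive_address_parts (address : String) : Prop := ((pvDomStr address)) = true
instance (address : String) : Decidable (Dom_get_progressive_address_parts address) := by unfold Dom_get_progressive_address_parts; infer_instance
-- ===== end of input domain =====

-- B rebuilds each progressive prefix independently by slicing and space-joining the cleaned parts,
-- instead of A's running `current` accumulator; objective: simpler.


-- ===== PORT A =====
def get_progressive_address_parts (address : String) : List String :=
  let parts := ((PySem.Str.split? address ",").getD []).map PySem.Str.strip  -- sep = "," ≠ "": split? is always some
  match parts with
  | [] => []          -- unreachable: str.split(',') never returns an empty list
  | p0 :: rest =>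
    (rest.foldl
      (fun (st : String × List String) part =>
        let current := PySem.Str.join " " [st.1, part]   -- f"{current} {part}": exact single-space concatenation
        (current, st.2 ++ [current]))
      (p0, [p0])).2

-- ===== PORT B =====
def get_progressive_address_parts_alt (address : String) : List String :=
  let parts := ((PySem.Str.split? address ",").getD []).map PySem.Str.strip
  (PySem.List.pyRange 0 (PySem.List.len parts) 1).map
    (fun i => PySem.Str.join " " (PySem.List.slice parts none (some (i + 1))))

-- ===== PRECONDITION & SPEC =====
def Spec_get_progressive_address_parts (address : String) (out : List String) : Prop := out = get_progressive_address_parts_alt address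
instance (address : String) (out : List String) : Decidable (Spec_get_progressive_address_parts address out) := by unfold Spec_get_progressive_address_parts; infer_instance

-- ===== CLAIM (what is proved, stated in full; the proofs are below) =====
def Claim_equal_get_progressive_address_parts : Prop := ∀ (address : String), Dom_get_progressive_address_parts address → Spec_get_progressive_address_parts address (get_progressive_address_parts address)

-- ===== LEMMAS AND PROOFS =====

-- " ".join(["x y", z, …]) where "x y" = " ".join([x, y]) flattens to " ".join([x, y, z, …])
theorem pv_join_step (c p : String) (l : List String) :
    PySem.Str.join " " (PySem.Str.join " " [c, p] :: l) = PySem.Str.join " " (c :: p :: l) := by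
  apply String.toList_inj.mp
  cases l with
  | nil =>
      simp [PySem.Str.toList_join, PySem.Chars.join_singleton]
  | cons x l' =>
      simp [PySem.Str.toList_join, PySem.Chars.join_cons_cons, PySem.Chars.join_singleton]

theorem pv_join_single (p : String) : PySem.Str.join " " [p] = p := by
  apply String.toList_inj.mp
  simp [PySem.Str.toList_join, PySem.Chars.join_singleton]

-- characterisation of A's fold: the collected list is the space-joins of the growing prefixes
theorem pv_loopA (rest : List String) : ∀ (current : String) (acc : List String),
    (rest.foldl
      (fun (st : String × List String) part =>
        (PySem.Str.join " " [st.1, part], st.2 ++ [PySem.Str.join " " [st.1, part]])) (current, acc)).2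
    = acc ++ (List.range rest.length).map
        (fun k => PySem.Str.join " " (current :: rest.take (k + 1))) := by
  induction rest with
  | nil => intro current acc; simp
  | cons part rest' ih =>
      intro current acc
      simp only [List.foldl_cons]
      rw [ih]
      simp only [List.length_cons, List.range_succ_eq_map, List.map_cons, List.map_map]
      simp [pv_join_step, List.take_succ_cons, Function.comp, List.append_assoc]

-- characterisation of B's comprehension: join of take (k+1) for each k < length
theorem pv_altB (parts : List String) :
    (PySem.List.pyRange 0 (PySem.List.len parts) 1).map
      (fun i => PySem.Str.join " " (PySem.List.slice parts none (some (i + 1))))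
    = (List.range parts.length).map
        (fun k => PySem.Str.join " " (parts.take (k + 1))) := by
  rw [PySem.List.pyRange_one, List.map_map]
  simp only [PySem.List.len]
  apply List.map_congr_left
  intro k _
  have h0 : (0 : Int) ≤ 0 + (k : Int) + 1 := by omega
  rw [Function.comp_apply, PySem.List.slice_to _ h0]
  have h1 : ((0 : Int) + (k : Int) + 1).toNat = k + 1 := by omega
  rw [h1]

-- ===== VERDICT (by name: the statement is the Claim_ definition above) =====
theorem get_progressive_address_parts_spec : Claim_equal_get_progressive_address_parts := by
  intro address _
  unfold Spec_get_progressive_address_parts get_progressive_address_parts get_progressive_address_parts_alt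
  dsimp only
  rw [pv_altB]
  generalize ((PySem.Str.split? address ",").getD []).map PySem.Str.strip = parts
  cases parts with
  | nil => simp
  | cons p0 rest =>
      dsimp only
      rw [pv_loopA]
      simp only [List.length_cons, List.range_succ_eq_map, List.map_cons, List.map_map]
      simp [pv_join_single, List.take_succ_cons, Function.comp]
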